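-- pv_equiv track=rewrite | github.com/BinatM/Python | check.py | diff_sparse_matrices
-- ===== SOURCE A (Python) =====
-- def diff_sparse_matrices(lst):
--     new_dic = {}
--     diction_index = 0
--     for dictions in lst:
--         for key in dictions:
--             if key in new_dic:
--                 new_dic[key] = new_dic[key] - dictions[key]
--             elif not key in new_dic and diction_index > 0:
--                 new_dic[key] = -1*dictions.get(key, 0)
--             else:
--                 new_dic[key] = dictions.get(key, 0)
--         diction_index += 1
--     for dictions in lst:
--         for new_key in new_dic.copy():
--             if new_dic[new_key] == 0:
--                 new_dic.pop(new_key)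
--
--     return new_dic
-- ===== SOURCE B (Python) =====
-- def diff_sparse_matrices(lst):
--     if not lst:
--         return {}
--     first, rest = lst[0], lst[1:]
--     keys = {k: None for d in lst for k in d}
--     out = {}
--     for k in keys:
--         v = first.get(k, 0) - sum(d.get(k, 0) for d in rest)
--         if v != 0:
--             out[k] = v
--     return out
-- ===== Notes on version B (the rewrite author's own statement) =====
-- stated objective: alternative
-- what changed: B transposes the traversal: it collects the distinct keys once in first-appearance order and computes each output value by a per-key closed form (first.get(k,0) minus the sum of the later matrices' entries at k), with one conditional insert per key, instead of A's matrix-by-matrix accumulator dict with three-way membership/index branching followed by len(lst) repeated zero-purge passes.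
import Mathlib
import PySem

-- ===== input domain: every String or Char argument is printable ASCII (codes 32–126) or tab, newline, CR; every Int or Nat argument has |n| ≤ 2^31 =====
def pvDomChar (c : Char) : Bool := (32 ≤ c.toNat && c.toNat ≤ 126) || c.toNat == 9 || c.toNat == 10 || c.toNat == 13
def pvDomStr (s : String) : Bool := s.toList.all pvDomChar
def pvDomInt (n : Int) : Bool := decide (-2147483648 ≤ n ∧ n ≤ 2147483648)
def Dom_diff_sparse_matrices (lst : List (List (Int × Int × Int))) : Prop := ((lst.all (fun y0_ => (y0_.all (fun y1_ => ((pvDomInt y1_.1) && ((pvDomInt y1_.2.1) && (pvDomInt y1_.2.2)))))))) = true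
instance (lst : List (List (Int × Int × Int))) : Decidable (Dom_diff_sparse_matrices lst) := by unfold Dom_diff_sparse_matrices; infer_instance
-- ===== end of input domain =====

-- B transposes the traversal: it collects the distinct keys once (first-appearance order) and
-- computes each output value by a per-key closed form over all matrices, replacing A's
-- matrix-by-matrix accumulator with three-way branching and its repeated zero-purge passes
-- (objective: alternative).
-- Each inner dict[tuple[int,int],int] is the assoc list of triples (r, c, v) with key (r, c).

-- ===== PORT A =====
-- the inner assoc list viewed as the Python dict 'dictions' (for the lookups dictions[key] / dictions.get(key, 0))
def pvDictOf (dictions : List (Int × Int × Int)) : PySem.Dict (Int × Int) Int :=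
  PySem.Dict.mk (dictions.map (fun t => ((t.1, t.2.1), t.2.2)))

def diff_sparse_matrices (lst : List (List (Int × Int × Int))) : List (Int × Int × Int) :=
  -- new_dic = {}; diction_index = 0; first loop (key iterates over dictions, so the
  -- lookup dictions[key] cannot raise: ported as (pvDictOf dictions).getD key 0)
  let st := lst.foldl
    (fun (st : PySem.Dict (Int × Int) Int × Int) dictions =>
      (dictions.foldl
        (fun nd t =>
          if nd.contains (t.1, t.2.1) then
            nd.insert (t.1, t.2.1) (nd.getD (t.1, t.2.1) 0 - (pvDictOf dictions).getD (t.1, t.2.1) 0)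
          else if !nd.contains (t.1, t.2.1) && decide (st.2 > 0) then
            nd.insert (t.1, t.2.1) ((-1) * (pvDictOf dictions).getD (t.1, t.2.1) 0)
          else
            nd.insert (t.1, t.2.1) ((pvDictOf dictions).getD (t.1, t.2.1) 0))
        st.1,
       st.2 + 1))
    (PySem.Dict.empty, (0 : Int))
  -- second loop: one zero-purge pass over new_dic.copy() per element of lst
  let final := lst.foldl
    (fun nd (_ : List (Int × Int × Int)) =>
      nd.items.foldl (fun a kv => if a.getD kv.1 0 == 0 then a.erase kv.1 else a) nd)
    st.1
  final.items.map (fun kv => (kv.1.1, kv.1.2, kv.2))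

-- ===== PORT B =====
def diff_sparse_matrices_alt (lst : List (List (Int × Int × Int))) : List (Int × Int × Int) :=
  match lst with
  | [] => []
  | first :: rest =>
    -- keys = {k: None for d in lst for k in d}
    let keysDict : PySem.Dict (Int × Int) (Option Int) :=
      (first :: rest).foldl
        (fun kd d => d.foldl (fun kd t => kd.insert (t.1, t.2.1) none) kd)
        PySem.Dict.empty
    -- for k in keys: v = first.get(k, 0) - sum(d.get(k, 0) for d in rest); if v != 0: out[k] = v
    let out : PySem.Dict (Int × Int) Int :=
      keysDict.keys.foldl
        (fun out k =>
          let v := (pvDictOf first).getD k 0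
                     - rest.foldl (fun acc d => acc + (pvDictOf d).getD k 0) 0
          if v != 0 then out.insert k v else out)
        PySem.Dict.empty
    out.items.map (fun kv => (kv.1.1, kv.1.2, kv.2))

-- ===== PRECONDITION & SPEC =====
-- Pre_ excludes inner lists with duplicate (row, col) keys: those encode no Python dict
-- (A's argument elements are dicts, whose keys are unique), so nothing A accepts is excluded.
def Pre_diff_sparse_matrices (lst : List (List (Int × Int × Int))) : Prop :=
  ∀ dct ∈ lst, (dct.map (fun t => (t.1, t.2.1))).Nodup
instance (lst : List (List (Int × Int × Int))) : Decidable (Pre_diff_sparse_matrices lst) := by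
  unfold Pre_diff_sparse_matrices; infer_instance

def pvWitness_diff_sparse_matrices : (List (List (Int × Int × Int))) :=
  [[(0, 0, 1), (1, 2, 3)], [(0, 0, 1), (2, 2, 5)]]

def Spec_diff_sparse_matrices (lst : List (List (Int × Int × Int))) (out : List (Int × Int × Int)) : Prop :=
  out = diff_sparse_matrices_alt lst
instance (lst : List (List (Int × Int × Int))) (out : List (Int × Int × Int)) : Decidable (Spec_diff_sparse_matrices lst out) := by
  unfold Spec_diff_sparse_matrices; infer_instance

-- ===== CLAIM =====
def Claim_equal_diff_sparse_matrices : Prop :=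
  ∀ (lst : List (List (Int × Int × Int))), Dom_diff_sparse_matrices lst →
    Pre_diff_sparse_matrices lst → Spec_diff_sparse_matrices lst (diff_sparse_matrices lst)

-- ===== LEMMAS AND PROOFS =====
theorem pv_lookup (dictions : List (Int × Int × Int))
    (hnd : (dictions.map (fun t => (t.1, t.2.1))).Nodup) :
    ∀ t ∈ dictions, (pvDictOf dictions).getD (t.1, t.2.1) 0 = t.2.2 := by
  intro t ht
  apply PySem.Dict.getD_of_mem_items
  · exact List.mem_map.mpr ⟨t, ht, rfl⟩
  · simpa [pvDictOf, PySem.Dict.keys, List.map_map, Function.comp] using hnd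

theorem pv_inner0 (d : PySem.Dict (Int × Int) Int) :
    ∀ (l : List (Int × Int × Int)) (s : PySem.Dict (Int × Int) Int),
    (∀ t ∈ l, d.getD (t.1, t.2.1) 0 = t.2.2) →
    (l.map (fun t => (t.1, t.2.1))).Nodup →
    (∀ t ∈ l, s.contains (t.1, t.2.1) = false) →
    l.foldl
      (fun nd t =>
        if nd.contains (t.1, t.2.1) then
          nd.insert (t.1, t.2.1) (nd.getD (t.1, t.2.1) 0 - d.getD (t.1, t.2.1) 0)
        else if !nd.contains (t.1, t.2.1) && decide ((0 : Int) > 0) then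
          nd.insert (t.1, t.2.1) ((-1) * d.getD (t.1, t.2.1) 0)
        else
          nd.insert (t.1, t.2.1) (d.getD (t.1, t.2.1) 0)) s
      = l.foldl (fun s t => s.insert (t.1, t.2.1) t.2.2) s := by
  intro l
  induction l with
  | nil => intro s _ _ _; rfl
  | cons t l ih =>
    intro s hd hnd hfresh
    have hc : s.contains (t.1, t.2.1) = false := hfresh t (by simp)
    have hv : d.getD (t.1, t.2.1) 0 = t.2.2 := hd t (by simp)
    have hstep : (if s.contains (t.1, t.2.1) = true then
          s.insert (t.1, t.2.1) (s.getD (t.1, t.2.1) 0 - d.getD (t.1, t.2.1) 0)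
        else if (!s.contains (t.1, t.2.1) && decide ((0 : Int) > 0)) = true then
          s.insert (t.1, t.2.1) ((-1) * d.getD (t.1, t.2.1) 0)
        else
          s.insert (t.1, t.2.1) (d.getD (t.1, t.2.1) 0)) = s.insert (t.1, t.2.1) t.2.2 := by
      simp [hc, hv]
    simp only [List.foldl_cons]
    rw [hstep]
    simp only [List.map_cons, List.nodup_cons] at hnd
    refine ih _ (fun t' ht' => hd t' (by simp [ht'])) hnd.2 ?_
    intro t' ht'
    rw [PySem.Dict.contains_insert]
    have hne : (t'.1, t'.2.1) ≠ (t.1, t.2.1) := by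
      intro h; exact hnd.1 (List.mem_map.mpr ⟨t', ht', h⟩)
    simp [hne, hfresh t' (by simp [ht'])]

theorem pv_innerPos (d : PySem.Dict (Int × Int) Int) (l : List (Int × Int × Int))
    (s : PySem.Dict (Int × Int) Int) (i : Int) (hi : 0 < i)
    (hd : ∀ t ∈ l, d.getD (t.1, t.2.1) 0 = t.2.2) :
    l.foldl
      (fun nd t =>
        if nd.contains (t.1, t.2.1) then
          nd.insert (t.1, t.2.1) (nd.getD (t.1, t.2.1) 0 - d.getD (t.1, t.2.1) 0)
        else if !nd.contains (t.1, t.2.1) && decide (i > 0) then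
          nd.insert (t.1, t.2.1) ((-1) * d.getD (t.1, t.2.1) 0)
        else
          nd.insert (t.1, t.2.1) (d.getD (t.1, t.2.1) 0)) s
      = l.foldl (fun s t => s.insert (t.1, t.2.1) (s.getD (t.1, t.2.1) 0 - t.2.2)) s := by
  apply PySem.List.foldl_congr_mem
  intro acc t ht
  rw [hd t ht]
  by_cases h : acc.contains (t.1, t.2.1)
  · simp [h]
  · have h' : acc.contains (t.1, t.2.1) = false := by simpa using h
    rw [PySem.Dict.getD_of_not_contains acc 0 h']
    simp [h', hi]

theorem pv_outer :
    ∀ (rest : List (List (Int × Int × Int))) (s : PySem.Dict (Int × Int) Int) (i : Int),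
    0 < i →
    (∀ dct ∈ rest, (dct.map (fun t => (t.1, t.2.1))).Nodup) →
    (rest.foldl
      (fun (st : PySem.Dict (Int × Int) Int × Int) dictions =>
        (dictions.foldl
          (fun nd t =>
            if nd.contains (t.1, t.2.1) then
              nd.insert (t.1, t.2.1) (nd.getD (t.1, t.2.1) 0 - (pvDictOf dictions).getD (t.1, t.2.1) 0)
            else if !nd.contains (t.1, t.2.1) && decide (st.2 > 0) then
              nd.insert (t.1, t.2.1) ((-1) * (pvDictOf dictions).getD (t.1, t.2.1) 0)
            else
              nd.insert (t.1, t.2.1) ((pvDictOf dictions).getD (t.1, t.2.1) 0))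
          st.1,
         st.2 + 1))
      (s, i)).1
    = rest.foldl
        (fun s d => d.foldl (fun s t => s.insert (t.1, t.2.1) (s.getD (t.1, t.2.1) 0 - t.2.2)) s)
        s := by
  intro rest
  induction rest with
  | nil => intro s i _ _; rfl
  | cons dct rest ih =>
    intro s i hi hnd
    simp only [List.foldl_cons]
    rw [pv_innerPos (pvDictOf dct) dct s i hi (pv_lookup dct (hnd dct (by simp)))]
    exact ih _ (i + 1) (by omega) (fun d hd => hnd d (by simp [hd]))

theorem pv_unique_key (a : PySem.Dict (Int × Int) Int) (hnd : a.keys.Nodup)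
    {p q : (Int × Int) × Int} (hp : p ∈ a.items) (hq : q ∈ a.items) (h1 : p.1 = q.1) : p = q := by
  have h2 := PySem.Dict.get?_of_mem_items a (k := p.1) (v := p.2) (by simpa using hp) hnd
  have h3 := PySem.Dict.get?_of_mem_items a (k := q.1) (v := q.2) (by simpa using hq) hnd
  rw [h1, h3] at h2
  exact Prod.ext h1 (by simpa using h2.symm)

theorem pv_find_filter (k k' : Int × Int) (h : k' ≠ k) :
    ∀ l : List ((Int × Int) × Int),
      (l.filter (fun p => !(p.1 == k))).find? (fun p => p.1 == k')
        = l.find? (fun p => p.1 == k') := by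
  intro l
  induction l with
  | nil => rfl
  | cons p l ih =>
    by_cases hk' : p.1 = k'
    · have hne : (p.1 == k) = false := by simp [hk']; exact h
      rw [List.filter_cons_of_pos (by simp [hne])]
      rw [List.find?_cons_of_pos (by simp [hk']), List.find?_cons_of_pos (by simp [hk'])]
    · by_cases hpk : p.1 = k
      · rw [List.filter_cons_of_neg (by simp [hpk])]
        rw [ih, List.find?_cons_of_neg (by simp [hk'])]
      · rw [List.filter_cons_of_pos (by simp [hpk])]
        rw [List.find?_cons_of_neg (by simp [hk']), List.find?_cons_of_neg (by simp [hk'])]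
        exact ih

theorem pv_get?_erase_of_ne (a : PySem.Dict (Int × Int) Int) (k k' : Int × Int) (h : k' ≠ k) :
    (a.erase k).get? k' = a.get? k' := by
  simp only [PySem.Dict.get?, PySem.Dict.erase]
  rw [pv_find_filter k k' h a.items]

theorem pv_purge_aux :
    ∀ (l : List ((Int × Int) × Int)) (a : PySem.Dict (Int × Int) Int),
    a.keys.Nodup → (l.map Prod.fst).Nodup → (∀ kv ∈ l, a.get? kv.1 = some kv.2) →
    (l.foldl (fun a kv => if a.getD kv.1 0 == 0 then a.erase kv.1 else a) a).items
      = a.items.filter (fun p => !(l.any (fun kv => kv.1 == p.1 && kv.2 == 0))) := by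
  intro l
  induction l with
  | nil => intro a _ _ _; simp
  | cons kv l ih =>
    intro a hka hkl hget
    have hv : a.getD kv.1 0 = kv.2 := by
      rw [PySem.Dict.getD_eq_get?_getD, hget kv (by simp)]; rfl
    simp only [List.map_cons, List.nodup_cons] at hkl
    simp only [List.foldl_cons, hv]
    by_cases h0 : kv.2 = 0
    · have herase_items : (a.erase kv.1).items = a.items.filter (fun p => !(p.1 == kv.1)) := rfl
      have hkeys : (a.erase kv.1).keys.Nodup := by
        have : (a.erase kv.1).keys.Sublist a.keys := by
          simp only [PySem.Dict.keys, herase_items]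
          exact List.Sublist.map _ List.filter_sublist
        exact hka.sublist this
      rw [if_pos (by simp [h0])]
      rw [ih (a.erase kv.1) hkeys hkl.2 ?_]
      · rw [herase_items, List.filter_filter]
        apply List.filter_congr
        intro p _
        by_cases hpk : p.1 = kv.1
        · simp [hpk, h0]
        · simp [show (p.1 == kv.1) = false from by simp [hpk],
                show (kv.1 == p.1) = false from by simp [Ne.symm hpk], h0, Bool.and_comm]
      · intro kv' hkv'
        rw [pv_get?_erase_of_ne a kv.1 kv'.1 ?_]
        · exact hget kv' (by simp [hkv'])
        · intro h; exact hkl.1 (List.mem_map.mpr ⟨kv', hkv', h⟩)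
    · rw [if_neg (by simp [h0])]
      rw [ih a hka hkl.2 (fun kv' h => hget kv' (by simp [h]))]
      apply List.filter_congr
      intro p _
      simp [h0]

theorem pv_purge_once (a : PySem.Dict (Int × Int) Int) (hnd : a.keys.Nodup) :
    (a.items.foldl (fun b kv => if b.getD kv.1 0 == 0 then b.erase kv.1 else b) a).items
      = a.items.filter (fun p => !(p.2 == 0)) := by
  rw [pv_purge_aux a.items a hnd (by simpa [PySem.Dict.keys] using hnd)
      (fun kv h => PySem.Dict.get?_of_mem_items a (by simpa using h) hnd)]
  apply List.filter_congr
  intro p hp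
  congr 1
  by_cases h0 : p.2 = 0
  · simp only [h0]
    rw [List.any_eq_true.mpr ⟨p, hp, by simp [h0]⟩]
    simp
  · rw [show a.items.any (fun kv => kv.1 == p.1 && kv.2 == 0) = false from ?_]
    · simp [h0]
    · rw [List.any_eq_false]
      intro kv hkv
      simp only [Bool.and_eq_true, beq_iff_eq, not_and]
      intro h1
      have := pv_unique_key a hnd hkv hp h1
      subst this
      exact h0

theorem pv_purge_repeat :
    ∀ (L : List (List (Int × Int × Int))) (a : PySem.Dict (Int × Int) Int),
    a.keys.Nodup → (∀ p ∈ a.items, ¬ p.2 = 0) →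
    L.foldl
      (fun nd (_ : List (Int × Int × Int)) =>
        nd.items.foldl (fun b kv => if b.getD kv.1 0 == 0 then b.erase kv.1 else b) nd) a = a := by
  intro L
  induction L with
  | nil => intro a _ _; rfl
  | cons x xs ih =>
    intro a hnd hnz
    simp only [List.foldl_cons]
    have hfix : (a.items.foldl (fun b kv => if b.getD kv.1 0 == 0 then b.erase kv.1 else b) a) = a := by
      apply PySem.Dict.ext
      rw [pv_purge_once a hnd]
      apply List.filter_eq_self.mpr
      intro p hp
      simp [hnz p hp]
    rw [hfix]
    exact ih a hnd hnz

theorem pv_nodup_outer (rest : List (List (Int × Int × Int))) :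
    ∀ (s : PySem.Dict (Int × Int) Int), s.keys.Nodup →
    (rest.foldl
      (fun s d => d.foldl (fun s t => s.insert (t.1, t.2.1) (s.getD (t.1, t.2.1) 0 - t.2.2)) s)
      s).keys.Nodup := by
  induction rest with
  | nil => intro s hs; exact hs
  | cons d rest ih =>
    intro s hs
    simp only [List.foldl_cons]
    exact ih _ (PySem.Dict.nodup_keys_foldl_insert_key d (fun t => (t.1, t.2.1))
      (fun s t => s.getD (t.1, t.2.1) 0 - t.2.2) s hs)

theorem pv_nodup_sums (d0 : List (Int × Int × Int)) (rest : List (List (Int × Int × Int))) :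
    (rest.foldl
      (fun s d => d.foldl (fun s t => s.insert (t.1, t.2.1) (s.getD (t.1, t.2.1) 0 - t.2.2)) s)
      (d0.foldl (fun s t => s.insert (t.1, t.2.1) t.2.2) PySem.Dict.empty)).keys.Nodup :=
  pv_nodup_outer rest _
    (PySem.Dict.nodup_keys_foldl_insert_key d0 (fun t => (t.1, t.2.1)) (fun _ t => t.2.2)
      PySem.Dict.empty (by rw [PySem.Dict.keys_empty]; exact List.nodup_nil))

theorem pv_purge_keys (a : PySem.Dict (Int × Int) Int) (hnd : a.keys.Nodup) :
    (a.items.foldl (fun b kv => if b.getD kv.1 0 == 0 then b.erase kv.1 else b) a).keys.Nodup := by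
  have h : (a.items.foldl (fun b kv => if b.getD kv.1 0 == 0 then b.erase kv.1 else b) a).keys.Sublist a.keys := by
    simp only [PySem.Dict.keys, pv_purge_once a hnd]
    exact List.Sublist.map _ List.filter_sublist
  exact hnd.sublist h

theorem pv_purge_nz (a : PySem.Dict (Int × Int) Int) (hnd : a.keys.Nodup) :
    ∀ p ∈ (a.items.foldl (fun b kv => if b.getD kv.1 0 == 0 then b.erase kv.1 else b) a).items,
      ¬ p.2 = 0 := by
  rw [pv_purge_once a hnd]
  intro p hp
  have := (List.mem_filter.mp hp).2
  simpa using this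

-- B-side lemma: the first matrix's plain-insert fold from empty IS the dict view of that matrix
theorem pv_first_fold (d0 : List (Int × Int × Int))
    (hnd : (d0.map (fun t => (t.1, t.2.1))).Nodup) :
    d0.foldl (fun s t => s.insert (t.1, t.2.1) t.2.2) PySem.Dict.empty = pvDictOf d0 := by
  apply PySem.Dict.ext
  have h := PySem.Dict.items_foldl_insert_fresh d0 (fun t => (t.1, t.2.1)) (fun t => t.2.2)
      PySem.Dict.empty (fun a _ => PySem.Dict.contains_empty _) hnd
  simpa [pvDictOf] using h

-- B-side lemma: one subtracting inner fold shifts every lookup by that matrix's entry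
theorem pv_getD_subfold :
    ∀ (d : List (Int × Int × Int)), (d.map (fun t => (t.1, t.2.1))).Nodup →
    ∀ (s : PySem.Dict (Int × Int) Int) (k : Int × Int),
    (d.foldl (fun s t => s.insert (t.1, t.2.1) (s.getD (t.1, t.2.1) 0 - t.2.2)) s).getD k 0
      = s.getD k 0 - (pvDictOf d).getD k 0 := by
  intro d
  induction d with
  | nil =>
    intro _ s k
    simp [pvDictOf, PySem.Dict.getD, PySem.Dict.get?]
  | cons t d ih =>
    intro hnd s k
    simp only [List.map_cons, List.nodup_cons] at hnd
    simp only [List.foldl_cons]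
    rw [ih hnd.2]
    have hcons : (pvDictOf (t :: d)).getD k 0
        = if k = (t.1, t.2.1) then t.2.2 else (pvDictOf d).getD k 0 := by
      simp only [pvDictOf, List.map_cons, PySem.Dict.getD_eq_get?_getD,
        PySem.Dict.get?_mk_cons]
      by_cases hk : k = (t.1, t.2.1)
      · simp [hk]
      · have hne : ((t.1, t.2.1) == k) = false := by
          simpa using fun h => hk h.symm
        simp [hne, hk]
    rw [hcons, PySem.Dict.getD_insert]
    by_cases hk : k = (t.1, t.2.1)
    · have habs : (pvDictOf d).getD (t.1, t.2.1) 0 = 0 := by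
        apply PySem.Dict.getD_of_not_contains
        rw [PySem.Dict.contains_eq_decide_mem_keys]
        simp only [pvDictOf, PySem.Dict.keys_mk, List.map_map]
        simpa [Function.comp] using hnd.1
      rw [if_pos hk, if_pos hk, hk, habs]
      ring
    · rw [if_neg hk, if_neg hk]

-- B-side lemma: the whole subtracting outer fold, as a lookup shifted by the per-matrix sum
theorem pv_getD_restfold :
    ∀ (rest : List (List (Int × Int × Int))),
    (∀ d ∈ rest, (d.map (fun t => (t.1, t.2.1))).Nodup) →
    ∀ (s : PySem.Dict (Int × Int) Int) (k : Int × Int),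
    (rest.foldl
      (fun s d => d.foldl (fun s t => s.insert (t.1, t.2.1) (s.getD (t.1, t.2.1) 0 - t.2.2)) s)
      s).getD k 0
      = s.getD k 0 - rest.foldl (fun acc d => acc + (pvDictOf d).getD k 0) 0 := by
  intro rest
  induction rest with
  | nil => intro _ s k; simp
  | cons d rest ih =>
    intro hnd s k
    simp only [List.foldl_cons]
    rw [ih (fun d' h => hnd d' (by simp [h])), pv_getD_subfold d (hnd d (by simp))]
    simp only [PySem.List.foldl_add]
    ring

-- B-side lemma: an insert-only fold's keys depend only on the sequence of inserted keys
theorem pv_keys_fold_eq {ν₁ ν₂ : Type}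
    (g₁ : PySem.Dict (Int × Int) ν₁ → Int × Int × Int → ν₁)
    (g₂ : PySem.Dict (Int × Int) ν₂ → Int × Int × Int → ν₂) :
    ∀ (L : List (List (Int × Int × Int)))
      (s₁ : PySem.Dict (Int × Int) ν₁) (s₂ : PySem.Dict (Int × Int) ν₂),
    s₁.keys = s₂.keys →
    (L.foldl (fun s d => d.foldl (fun s t => s.insert (t.1, t.2.1) (g₁ s t)) s) s₁).keys
      = (L.foldl (fun s d => d.foldl (fun s t => s.insert (t.1, t.2.1) (g₂ s t)) s) s₂).keys := by
  intro L
  induction L with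
  | nil => intro s₁ s₂ h; exact h
  | cons d L ih =>
    intro s₁ s₂ h
    simp only [List.foldl_cons]
    apply ih
    rw [PySem.Dict.keys_foldl_insert_key d (fun t => (t.1, t.2.1)) g₁ s₁,
        PySem.Dict.keys_foldl_insert_key d (fun t => (t.1, t.2.1)) g₂ s₂, h]

-- B-side lemma: the conditional-insert output loop over fresh distinct keys builds a filtered map
theorem pv_out_fold (val : Int × Int → Int) :
    ∀ (ks : List (Int × Int)), ks.Nodup →
    ∀ (s : PySem.Dict (Int × Int) Int), (∀ k ∈ ks, s.contains k = false) →
    (ks.foldl (fun out k => if val k != 0 then out.insert k (val k) else out) s).items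
      = s.items ++ (ks.map (fun k => (k, val k))).filter (fun p => !(p.2 == 0)) := by
  intro ks
  induction ks with
  | nil => intro _ s _; simp
  | cons k ks ih =>
    intro hnd s hfresh
    simp only [List.nodup_cons] at hnd
    simp only [List.foldl_cons, List.map_cons]
    by_cases h0 : val k = 0
    · rw [if_neg (by simp [h0])]
      rw [List.filter_cons_of_neg (by simp [h0])]
      exact ih hnd.2 s (fun k' h => hfresh k' (by simp [h]))
    · rw [if_pos (by simp [h0])]
      rw [List.filter_cons_of_pos (by simp [h0])]
      rw [ih hnd.2 (s.insert k (val k)) ?_]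
      · rw [PySem.Dict.items_insert_of_not_contains s (val k) (hfresh k (by simp))]
        simp
      · intro k' hk'
        rw [PySem.Dict.contains_insert]
        simp [show ¬ k' = k from fun h => hnd.1 (h ▸ hk'), hfresh k' (by simp [hk'])]

theorem pv_main (d0 : List (Int × Int × Int)) (rest : List (List (Int × Int × Int)))
    (hpre : ∀ dct ∈ d0 :: rest, (dct.map (fun t => (t.1, t.2.1))).Nodup) :
    diff_sparse_matrices (d0 :: rest) = diff_sparse_matrices_alt (d0 :: rest) := by
  have hnd0 := hpre d0 (by simp)
  have hndr : ∀ dct ∈ rest, (dct.map (fun t => (t.1, t.2.1))).Nodup :=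
    fun d h => hpre d (by simp [h])
  simp only [diff_sparse_matrices, diff_sparse_matrices_alt]
  rw [List.foldl_cons, List.foldl_cons]
  rw [pv_inner0 (pvDictOf d0) d0 PySem.Dict.empty (pv_lookup d0 hnd0) hnd0
      (fun t _ => by simp [PySem.Dict.contains_empty])]
  rw [pv_outer rest _ (0 + 1) (by norm_num) hndr]
  have hnd : (rest.foldl
      (fun s d => d.foldl (fun s t => s.insert (t.1, t.2.1) (s.getD (t.1, t.2.1) 0 - t.2.2)) s)
      (d0.foldl (fun s t => s.insert (t.1, t.2.1) t.2.2) PySem.Dict.empty)).keys.Nodup :=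
    pv_nodup_sums d0 rest
  rw [pv_purge_repeat rest _ (pv_purge_keys _ hnd) (pv_purge_nz _ hnd)]
  rw [pv_purge_once _ hnd]
  -- abbreviate A's accumulated dict
  set sums := rest.foldl
      (fun s d => d.foldl (fun s t => s.insert (t.1, t.2.1) (s.getD (t.1, t.2.1) 0 - t.2.2)) s)
      (d0.foldl (fun s t => s.insert (t.1, t.2.1) t.2.2) PySem.Dict.empty) with hsums
  -- B's key order is A's key order
  have hkeys : (((d0 :: rest).foldl
      (fun kd d => d.foldl (fun kd t => kd.insert (t.1, t.2.1) (none : Option Int)) kd)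
      PySem.Dict.empty)).keys = sums.keys := by
    rw [hsums]
    simp only [List.foldl_cons]
    apply pv_keys_fold_eq
    rw [PySem.Dict.keys_foldl_insert_key d0 (fun t => (t.1, t.2.1))
          (fun _ _ => (none : Option Int)) PySem.Dict.empty,
        PySem.Dict.keys_foldl_insert_key d0 (fun t => (t.1, t.2.1))
          (fun _ t => t.2.2) PySem.Dict.empty]
    rfl
  -- B's per-key closed form is A's accumulated value
  have hval : ∀ k, (pvDictOf d0).getD k 0
      - rest.foldl (fun acc d => acc + (pvDictOf d).getD k 0) 0 = sums.getD k 0 := by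
    intro k
    rw [hsums, pv_getD_restfold rest hndr, pv_first_fold d0 hnd0]
  -- assemble
  rw [hkeys]
  rw [pv_out_fold (fun k => (pvDictOf d0).getD k 0
        - rest.foldl (fun acc d => acc + (pvDictOf d).getD k 0) 0)
      sums.keys hnd PySem.Dict.empty (fun k _ => PySem.Dict.contains_empty _)]
  rw [PySem.Dict.items_eq_map_keys sums hnd 0]
  have hmaps : sums.keys.map (fun k => (k, (pvDictOf d0).getD k 0
        - rest.foldl (fun acc d => acc + (pvDictOf d).getD k 0) 0))
      = sums.keys.map (fun k => (k, sums.getD k 0)) :=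
    List.map_congr_left (fun k _ => by rw [hval k])
  rw [hmaps]
  simp [PySem.Dict.empty]

-- ===== VERDICT =====
theorem diff_sparse_matrices_spec : Claim_equal_diff_sparse_matrices := by
  unfold Claim_equal_diff_sparse_matrices
  intro lst _dom hpre
  unfold Spec_diff_sparse_matrices
  cases lst with
  | nil => rfl
  | cons d0 rest => exact pv_main d0 rest hpre
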